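-- pv_equiv track=rewrite | github.com/chenye95/LeetCode_Progress | 2260_MinCardPickUp.py | minimum_pick_up
-- ===== SOURCE A (Python) =====
-- from typing import List
--
-- def minimum_pick_up(cards: List[int]) -> int:
--     return_val = len(cards) + 1
--     last_seen = {}
--
--     for i, card_i in enumerate(cards):
--         if card_i in last_seen:
--             return_val = min(return_val, i - last_seen[card_i] + 1)
--         last_seen[card_i] = i
--
--     return -1 if return_val > len(cards) else return_val
-- ===== SOURCE B (Python) =====
-- from typing import List
--
-- def minimum_pick_up(cards: List[int]) -> int:
--     # Phase 1: group the indices of each card value.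
--     positions = {}
--     for i, c in enumerate(cards):
--         positions[c] = positions.get(c, []) + [i]
--     # Phase 2: scan consecutive occurrences within each group.
--     best = -1
--     for idx_list in positions.values():
--         for a, b in zip(idx_list, idx_list[1:]):
--             g = b - a + 1
--             if best == -1 or g < best:
--                 best = g
--     return best
-- ===== Notes on version B (the rewrite author's own statement) =====
-- stated objective: alternative
-- what changed: Replaces the single online last-seen/min scan by a two-phase grouping: first build a dict mapping each value to all its indices, then compute the minimum consecutive-index gap per group.
import Mathlib
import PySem

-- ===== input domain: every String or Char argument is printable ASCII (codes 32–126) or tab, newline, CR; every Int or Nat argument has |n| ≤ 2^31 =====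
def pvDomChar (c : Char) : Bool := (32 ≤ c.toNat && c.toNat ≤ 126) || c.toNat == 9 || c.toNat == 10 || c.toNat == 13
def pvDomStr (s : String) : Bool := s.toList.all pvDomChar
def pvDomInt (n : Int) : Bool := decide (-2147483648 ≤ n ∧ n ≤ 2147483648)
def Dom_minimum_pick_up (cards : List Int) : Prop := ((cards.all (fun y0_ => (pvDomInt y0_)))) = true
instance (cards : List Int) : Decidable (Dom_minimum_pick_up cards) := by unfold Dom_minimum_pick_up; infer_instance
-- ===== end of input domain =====

-- B replaces A's single online last-seen scan by a two-phase grouping (indices per value, then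
-- per-group consecutive gaps); same O(n) cost, alternative decomposition.

-- ===== PORT A =====
def minimum_pick_up (cards : List Int) : Int :=
  let n : Int := PySem.List.len cards
  let st := (PySem.List.enumerate cards 0).foldl
    (fun (st : Int × PySem.Dict Int Int) p =>
      (match st.2.get? p.2 with
        | some j => min st.1 (p.1 - j + 1)
        | none => st.1,
       st.2.insert p.2 p.1))
    (n + 1, PySem.Dict.empty)
  if st.1 > n then -1 else st.1

-- ===== PORT B =====
def minimum_pick_up_alt (cards : List Int) : Int :=
  let positions := (PySem.List.enumerate cards 0).foldl
    (fun (d : PySem.Dict Int (List Int)) p => d.modify p.2 [] (fun l => l ++ [p.1]))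
    PySem.Dict.empty
  positions.values.foldl
    (fun best idx_list =>
      (idx_list.zip (idx_list.drop 1)).foldl
        (fun best pr =>
          let g := pr.2 - pr.1 + 1
          if best == -1 || g < best then g else best)
        best)
    (-1)

-- ===== PRECONDITION & SPEC =====
def Spec_minimum_pick_up (cards : List Int) (out : Int) : Prop := out = minimum_pick_up_alt cards
instance (cards : List Int) (out : Int) : Decidable (Spec_minimum_pick_up cards out) := by unfold Spec_minimum_pick_up; infer_instance

-- ===== CLAIM (what is proved, stated in full; the proofs are below) =====
def Claim_equal_minimum_pick_up : Prop := ∀ (cards : List Int), Dom_minimum_pick_up cards → Spec_minimum_pick_up cards (minimum_pick_up cards)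

-- ===== LEMMAS AND PROOFS =====

-- B's "if best == -1 or g < best" update
def bUpd (b g : Int) : Int := if b == -1 || g < b then g else b

-- gaps between consecutive entries of a list of indices
def gapsOf (l : List Int) : List Int := (l.zip (l.drop 1)).map (fun pr => pr.2 - pr.1 + 1)

-- the indices at which v occurs in cards, in order
def posIn (cards : List Int) (v : Int) : List Int :=
  ((PySem.List.enumerate cards 0).filter (fun p => p.2 == v)).map (·.1)

-- the gaps A's scan encounters, in scan order, starting from last-seen dict d
def scanGaps (d : PySem.Dict Int Int) : List (Int × Int) → List Int
  | [] => []
  | p :: t => (match d.get? p.2 with | some j => [p.1 - j + 1] | none => []) ++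
      scanGaps (d.insert p.2 p.1) t

def dfold (d : PySem.Dict Int Int) (l : List (Int × Int)) : PySem.Dict Int Int :=
  l.foldl (fun d p => d.insert p.2 p.1) d

def GA (cards : List Int) : List Int := scanGaps PySem.Dict.empty (PySem.List.enumerate cards 0)

def GB (cards : List Int) : List Int :=
  ((PySem.Set.ofList cards).map (fun v => gapsOf (posIn cards v))).flatten

lemma A_loop (l : List (Int × Int)) : ∀ (rv : Int) (d : PySem.Dict Int Int),
    l.foldl (fun (st : Int × PySem.Dict Int Int) p =>
      (match st.2.get? p.2 with
        | some j => min st.1 (p.1 - j + 1)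
        | none => st.1,
       st.2.insert p.2 p.1)) (rv, d)
    = (List.foldl min rv (scanGaps d l), dfold d l) := by
  induction l with
  | nil => intro rv d; simp [scanGaps, dfold]
  | cons p t ih =>
    intro rv d
    simp only [List.foldl_cons, scanGaps, dfold, ih]
    cases h : d.get? p.2 <;> simp [h, dfold]

lemma scanGaps_append (l1 l2 : List (Int × Int)) : ∀ d,
    scanGaps d (l1 ++ l2) = scanGaps d l1 ++ scanGaps (dfold d l1) l2 := by
  induction l1 with
  | nil => intro d; simp [scanGaps, dfold]
  | cons p t ih =>
    intro d
    simp only [List.cons_append, scanGaps, ih, dfold, List.foldl_cons, List.append_assoc]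

lemma getLast?_cons' {α : Type} (a : α) (l : List α) :
    (a :: l).getLast? = l.getLast?.or (some a) := by
  cases l with
  | nil => rfl
  | cons b t =>
    rw [List.getLast?_cons_cons]
    rcases List.getLast?_isSome.mpr (by simp : b :: t ≠ []) |> Option.isSome_iff_exists.mp with ⟨x, hx⟩
    simp [hx]

lemma get?_dfold (l : List (Int × Int)) : ∀ (d : PySem.Dict Int Int) (v : Int),
    (dfold d l).get? v = ((l.filter (fun p => p.2 == v)).map (·.1)).getLast?.or (d.get? v) := by
  induction l with
  | nil => intro d v; simp [dfold]
  | cons p t ih =>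
    intro d v
    simp only [dfold, List.foldl_cons] at *
    rw [ih]
    by_cases h : p.2 = v
    · subst h
      simp only [List.filter_cons, beq_self_eq_true, if_pos, List.map_cons]
      rw [getLast?_cons', Option.or_assoc]
      simp [PySem.Dict.get?_insert_self]
    · have hb : (p.2 == v) = false := by simp [h]
      simp only [List.filter_cons, hb, Bool.false_eq_true, reduceIte]
      rw [PySem.Dict.get?_insert_of_ne d p.1 (fun hc => h (Eq.symm hc))]

lemma posIn_append_singleton (xs : List Int) (x v : Int) :
    posIn (xs ++ [x]) v = posIn xs v ++ (if x == v then [(xs.length : Int)] else []) := by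
  unfold posIn
  rw [PySem.List.enumerate_append]
  simp only [List.filter_append, List.map_append]
  congr 1
  cases h : (x == v) <;> simp [PySem.List.enumerate_cons, PySem.List.enumerate_nil, List.filter_cons, h]

lemma gapsOf_cons_cons (a b : Int) (t : List Int) :
    gapsOf (a :: b :: t) = (b - a + 1) :: gapsOf (b :: t) := rfl

lemma gapsOf_append_singleton (l : List Int) (e : Int) :
    gapsOf (l ++ [e]) = gapsOf l ++ (match l.getLast? with
      | some a => [e - a + 1] | none => []) := by
  induction l with
  | nil => rfl
  | cons a t ih =>
    cases t with
    | nil => rfl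
    | cons b t2 =>
      rw [List.cons_append, List.cons_append, gapsOf_cons_cons, ← List.cons_append,
        ih, gapsOf_cons_cons, List.getLast?_cons_cons, List.cons_append]

lemma mem_posIn_imp (cards : List Int) (v i : Int) (h : i ∈ posIn cards v) : v ∈ cards := by
  unfold posIn at h
  rcases List.mem_map.mp h with ⟨p, hp, _⟩
  rcases List.mem_filter.mp hp with ⟨hpe, hpv⟩
  rcases (PySem.List.mem_enumerate_iff _ _ _).mp hpe with ⟨k, hk, rfl⟩
  have : v = cards[k] := by simpa using (beq_iff_eq.mp hpv).symm
  subst this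
  exact List.getElem_mem hk

lemma gapsOf_nonempty_mem (l : List Int) (g : Int) (h : g ∈ gapsOf l) : ∃ i, i ∈ l := by
  unfold gapsOf at h
  rcases List.mem_map.mp h with ⟨pr, hpr, _⟩
  exact ⟨pr.1, (List.of_mem_zip hpr).1⟩

lemma mem_GA_iff (cards : List Int) (g : Int) :
    g ∈ GA cards ↔ ∃ v, g ∈ gapsOf (posIn cards v) := by
  induction cards using List.reverseRecOn with
  | nil => simp [GA, scanGaps, PySem.List.enumerate_nil, posIn, gapsOf]
  | append_singleton xs x ih =>
    have henum : PySem.List.enumerate (xs ++ [x]) 0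
        = PySem.List.enumerate xs 0 ++ [((xs.length : Int), x)] := by
      rw [PySem.List.enumerate_append]
      simp [PySem.List.enumerate_cons, PySem.List.enumerate_nil]
    have hGA : GA (xs ++ [x]) = GA xs ++ (match (posIn xs x).getLast? with
        | some a => [(xs.length : Int) - a + 1] | none => []) := by
      unfold GA
      rw [henum, scanGaps_append]
      congr 1
      have : (dfold PySem.Dict.empty (PySem.List.enumerate xs 0)).get? x
          = (posIn xs x).getLast? := by
        rw [get?_dfold]; simp [posIn]
      simp only [scanGaps, this]
      cases (posIn xs x).getLast? <;> simp [scanGaps]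
    rw [hGA]
    constructor
    · intro hm
      rcases List.mem_append.mp hm with hm | hm
      · rcases ih.mp hm with ⟨v, hv⟩
        refine ⟨v, ?_⟩
        rw [posIn_append_singleton]
        by_cases hxv : x = v
        · subst hxv
          rw [if_pos (by simp), gapsOf_append_singleton]
          exact List.mem_append.mpr (Or.inl hv)
        · rw [if_neg (by simp [hxv]), List.append_nil]; exact hv
      · refine ⟨x, ?_⟩
        rw [posIn_append_singleton, if_pos (by simp), gapsOf_append_singleton]
        exact List.mem_append.mpr (Or.inr hm)
    · rintro ⟨v, hv⟩
      rw [posIn_append_singleton] at hv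
      by_cases hxv : x = v
      · subst hxv
        rw [if_pos (by simp), gapsOf_append_singleton] at hv
        rcases List.mem_append.mp hv with hv | hv
        · exact List.mem_append.mpr (Or.inl (ih.mpr ⟨x, hv⟩))
        · exact List.mem_append.mpr (Or.inr hv)
      · rw [if_neg (by simp [hxv]), List.append_nil] at hv
        exact List.mem_append.mpr (Or.inl (ih.mpr ⟨v, hv⟩))

lemma mem_GB_iff (cards : List Int) (g : Int) :
    g ∈ GB cards ↔ ∃ v, g ∈ gapsOf (posIn cards v) := by
  unfold GB
  constructor
  · intro h
    rcases List.mem_flatten.mp h with ⟨gl, hgl, hg⟩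
    rcases List.mem_map.mp hgl with ⟨v, _, rfl⟩
    exact ⟨v, hg⟩
  · rintro ⟨v, hv⟩
    rcases gapsOf_nonempty_mem _ _ hv with ⟨i, hi⟩
    have hvc : v ∈ cards := mem_posIn_imp cards v i hi
    exact List.mem_flatten.mpr ⟨gapsOf (posIn cards v),
      List.mem_map.mpr ⟨v, (PySem.Set.mem_ofList _ _).mpr hvc, rfl⟩, hv⟩

lemma posIn_pairwise (cards : List Int) (v : Int) : (posIn cards v).Pairwise (· < ·) := by
  unfold posIn
  rw [List.pairwise_map]
  exact (PySem.List.pairwise_lt_enumerate cards 0).filter _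

lemma posIn_bounds (cards : List Int) (v : Int) :
    ∀ i ∈ posIn cards v, 0 ≤ i ∧ i + 1 ≤ (cards.length : Int) := by
  intro i hi
  unfold posIn at hi
  rcases List.mem_map.mp hi with ⟨p, hp, rfl⟩
  rcases (PySem.List.mem_enumerate_iff _ _ _).mp (List.mem_filter.mp hp).1 with ⟨k, hk, rfl⟩
  simp only [zero_add]
  omega

lemma gapsOf_bounds (n : Int) : ∀ (l : List Int), l.Pairwise (· < ·) →
    (∀ e ∈ l, 0 ≤ e ∧ e + 1 ≤ n) → ∀ g ∈ gapsOf l, 2 ≤ g ∧ g ≤ n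
  | [] => by intro _ _ g hg; simp [gapsOf] at hg
  | [a] => by intro _ _ g hg; simp [gapsOf] at hg
  | a :: b :: t => by
    intro hp hb g hg
    rw [gapsOf_cons_cons] at hg
    rcases List.mem_cons.mp hg with rfl | hg
    · have hab : a < b := (List.pairwise_cons.mp hp).1 b (by simp)
      have h1 := hb a (by simp)
      have h2 := hb b (by simp)
      omega
    · exact gapsOf_bounds n (b :: t) (List.pairwise_cons.mp hp).2
        (fun e he => hb e (List.mem_cons.mpr (Or.inr he))) g hg

lemma GB_bounds (cards : List Int) : ∀ g ∈ GB cards, 2 ≤ g ∧ g ≤ (cards.length : Int) := by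
  intro g hg
  rcases (mem_GB_iff cards g).mp hg with ⟨v, hv⟩
  exact gapsOf_bounds _ _ (posIn_pairwise cards v) (posIn_bounds cards v) g hv

lemma foldl_min_eq_of_memiff (a b : List Int) (init : Int) (h : ∀ g : Int, g ∈ a ↔ g ∈ b) :
    a.foldl min init = b.foldl min init := by
  have ha := PySem.List.foldl_min_le a init
  have hbb := PySem.List.foldl_min_le b init
  apply le_antisymm
  · rcases PySem.List.foldl_min_mem b init with he | hm
    · rw [he]; exact ha.1
    · exact ha.2 _ ((h _).mpr hm)
  · rcases PySem.List.foldl_min_mem a init with he | hm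
    · rw [he]; exact hbb.1
    · exact hbb.2 _ ((h _).mp hm)

lemma bUpd_pos (b g : Int) (hb : 1 ≤ b) : bUpd b g = min b g := by
  unfold bUpd
  have h1 : (b == -1) = false := by simp; omega
  rw [h1, min_def]
  simp only [Bool.false_or, decide_eq_true_eq]
  split_ifs <;> omega

lemma foldl_bUpd_eq_min : ∀ (t : List Int) (b : Int), 1 ≤ b → (∀ g ∈ t, 1 ≤ g) →
    t.foldl bUpd b = t.foldl min b
  | [] => by intro b _ _; rfl
  | g :: t => by
    intro b hb hg
    simp only [List.foldl_cons]
    rw [bUpd_pos b g hb]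
    exact foldl_bUpd_eq_min t (min b g) (le_min hb (hg g (by simp)))
      (fun x hx => hg x (by simp [hx]))

lemma final_eq (G : List Int) (n : Int) (hb : ∀ g ∈ G, 2 ≤ g ∧ g ≤ n) :
    (if List.foldl min (n + 1) G > n then -1 else List.foldl min (n + 1) G)
      = G.foldl bUpd (-1) := by
  cases G with
  | nil => simp
  | cons h t =>
    have hh := hb h (by simp)
    have h1 : min (n + 1) h = h := by omega
    have hmem : ∀ g ∈ t, 1 ≤ g := fun g hg => by have := hb g (by simp [hg]); omega
    have hB : (h :: t).foldl bUpd (-1) = t.foldl min h := by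
      simp only [List.foldl_cons]
      have : bUpd (-1) h = h := by unfold bUpd; simp
      rw [this, foldl_bUpd_eq_min t h (by omega) hmem]
    have hle := PySem.List.foldl_min_le t h
    rw [hB]
    simp only [List.foldl_cons, h1]
    have : ¬ (t.foldl min h > n) := by
      have := hle.1; omega
    rw [if_neg this]

-- B's value as a fold of bUpd over GB
lemma B_eq_fold (cards : List Int) :
    minimum_pick_up_alt cards = (GB cards).foldl bUpd (-1) := by
  unfold minimum_pick_up_alt
  simp only []
  -- the grouping dict
  set l := PySem.List.enumerate cards 0 with hl
  have hswap : l.foldl (fun (d : PySem.Dict Int (List Int)) p => d.modify p.2 [] (fun s => s ++ [p.1]))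
      PySem.Dict.empty
      = (l.map Prod.swap).foldl (fun (d : PySem.Dict Int (List Int)) p => d.modify p.1 [] (fun s => s ++ [p.2]))
      PySem.Dict.empty := by
    rw [List.foldl_map]
    rfl
  have hnodup : (l.foldl (fun (d : PySem.Dict Int (List Int)) p => d.modify p.2 [] (fun s => s ++ [p.1]))
      PySem.Dict.empty).keys.Nodup := by
    exact PySem.Dict.nodup_keys_foldl_modify_key l (fun p => p.2) [] _ _ PySem.Dict.nodup_keys_empty
  have hkeys : (l.foldl (fun (d : PySem.Dict Int (List Int)) p => d.modify p.2 [] (fun s => s ++ [p.1]))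
      PySem.Dict.empty).keys = PySem.Set.ofList cards := by
    rw [PySem.Dict.keys_foldl_modify_key]
    simp [PySem.List.map_snd_enumerate, PySem.Set.update_nil_left, hl]
  have hgetD : ∀ v, (l.foldl (fun (d : PySem.Dict Int (List Int)) p => d.modify p.2 [] (fun s => s ++ [p.1]))
      PySem.Dict.empty).getD v [] = posIn cards v := by
    intro v
    rw [hswap, PySem.Dict.getD_foldl_modify_append]
    simp only [PySem.Dict.getD_empty, List.nil_append]
    rw [List.filter_map, List.map_map]
    unfold posIn
    rw [← hl]
    congr 1
  have hvals : (l.foldl (fun (d : PySem.Dict Int (List Int)) p => d.modify p.2 [] (fun s => s ++ [p.1]))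
      PySem.Dict.empty).values = (PySem.Set.ofList cards).map (fun v => posIn cards v) := by
    rw [PySem.Dict.values_eq_map_keys _ hnodup ([] : List Int), hkeys]
    exact List.map_congr_left (fun v _ => hgetD v)
  rw [hvals]
  -- inner fold over zip = fold of bUpd over gapsOf
  have hinner : ∀ (idx : List Int) (b : Int),
      (idx.zip (idx.drop 1)).foldl (fun best pr =>
        let g := pr.2 - pr.1 + 1
        if best == -1 || g < best then g else best) b
      = (gapsOf idx).foldl bUpd b := by
    intro idx b
    unfold gapsOf
    rw [List.foldl_map]
    rfl
  unfold GB
  rw [List.foldl_flatten, List.foldl_map, List.foldl_map]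
  apply List.foldl_ext
  intro b v _
  exact hinner (posIn cards v) b

-- ===== VERDICT (by name: the statement is the Claim_ definition above) =====
theorem minimum_pick_up_spec : Claim_equal_minimum_pick_up := by
  intro cards _
  unfold Spec_minimum_pick_up
  unfold minimum_pick_up
  simp only [A_loop, PySem.List.len]
  rw [B_eq_fold]
  have hmm : List.foldl min ((cards.length : Int) + 1) (GA cards)
      = List.foldl min ((cards.length : Int) + 1) (GB cards) :=
    foldl_min_eq_of_memiff _ _ _ (fun g => (mem_GA_iff cards g).trans (mem_GB_iff cards g).symm)
  rw [show scanGaps PySem.Dict.empty (PySem.List.enumerate cards 0) = GA cards from rfl]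
  rw [hmm]
  exact final_eq (GB cards) _ (GB_bounds cards)
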